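-- pv_equiv track=rewrite | github.com/Fiooodooor/esp32-mjpeg-multiclient-espcam-drivers | PlatformIO/esp32-cam-rtos-pio/.github/skills/nic-driver-porting-orchestrator/scripts/tools/grep_file.py | _add_context
-- ===== SOURCE A (Python) =====
-- from typing import List, Optional
--
-- def _add_context(
--
--     lines: List[str],
--     match_indices: set,
--     before: int,
--     after: int,
--     line_number: bool
-- ) -> List[str]:
--     """Add context lines around matches"""
--     # Build set of all line indices to include
--     include_indices = set()
--     for idx in match_indices:
--         for i in range(max(0, idx - before), min(len(lines), idx + after + 1)):
--             include_indices.add(i)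
--
--     # Build output with separators between non-contiguous sections
--     result = []
--     sorted_indices = sorted(include_indices)
--     prev_idx = -2
--
--     for idx in sorted_indices:
--         # Add separator if there's a gap
--         if idx > prev_idx + 1 and prev_idx >= 0:
--             result.append("--")
--
--         line = lines[idx].rstrip()
--         if line_number:
--             # Use : for matches, - for context
--             sep = ":" if idx in match_indices else "-"
--             result.append(f"{idx + 1}{sep}{line}")
--         else:
--             result.append(line)
--
--         prev_idx = idx
--
--     return result
-- ===== SOURCE B (Python) =====
-- def _add_context(lines, match_indices, before, after, line_number):
--     """Filter all line indices by closeness to a match, then join with separators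
--     via a zip-with-previous pass: no include-index set is built and nothing is sorted."""
--     mset = set(match_indices)
--     included = [i for i in range(len(lines))
--                 if any(m - before <= i <= m + after for m in mset)]
--     out = []
--     for i, p in zip(included, [-2] + included):
--         if i > p + 1 and p >= 0:
--             out.append("--")
--         line = lines[i].rstrip()
--         if line_number:
--             out.append(f"{i + 1}{':' if i in mset else '-'}{line}")
--         else:
--             out.append(line)
--     return out
-- ===== Notes on version B (the rewrite author's own statement) =====
-- stated objective: simpler
-- what changed: B replaces A's per-match expansion into an index set plus a sort by one filtered pass over all line indices followed by a zip-with-previous pass that inserts separators; no set of covered indices and no sorting.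
import Mathlib
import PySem

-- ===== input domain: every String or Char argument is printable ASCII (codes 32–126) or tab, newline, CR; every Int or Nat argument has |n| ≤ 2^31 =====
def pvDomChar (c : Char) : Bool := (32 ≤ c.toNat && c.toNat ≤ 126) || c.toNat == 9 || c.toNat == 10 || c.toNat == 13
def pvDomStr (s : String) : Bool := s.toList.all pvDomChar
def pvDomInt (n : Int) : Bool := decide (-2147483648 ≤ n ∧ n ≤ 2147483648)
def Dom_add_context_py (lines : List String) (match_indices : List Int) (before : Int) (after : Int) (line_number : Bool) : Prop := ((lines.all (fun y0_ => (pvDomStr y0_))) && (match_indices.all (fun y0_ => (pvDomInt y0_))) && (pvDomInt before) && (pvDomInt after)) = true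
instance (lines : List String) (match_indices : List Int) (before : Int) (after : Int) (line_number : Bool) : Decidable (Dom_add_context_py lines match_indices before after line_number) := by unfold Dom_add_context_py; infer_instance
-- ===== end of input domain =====

-- B replaces A's per-match expansion into an index set plus a sort by one filtered
-- pass over all line indices and a zip-with-previous pass inserting the separators
-- (simpler decomposition; not claimed faster).

-- ===== PORT A =====
-- Python A: build include_indices as a set via nested loops, sort it, then emit with separators.
def add_context_py (lines : List String) (match_indices : List Int) (before : Int) (after : Int) (line_number : Bool) : List String :=
  ((PySem.List.sorted
      (match_indices.foldl (fun s idx =>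
        (PySem.List.pyRange (max 0 (idx - before)) (min (lines.length : Int) (idx + after + 1)) 1).foldl
          (fun s i => PySem.Set.add s i) s) PySem.Set.empty)
      (fun x => x)).foldl
    (fun (st : List String × Int) idx =>
      let result := if decide (idx > st.2 + 1) && decide (st.2 ≥ 0) then st.1 ++ ["--"] else st.1
      let line := PySem.Str.rstrip (PySem.List.pyGetD lines idx "")
      let result := if line_number then
          result ++ [PySem.Int.toStr (idx + 1) ++ (if match_indices.contains idx then ":" else "-") ++ line]
        else result ++ [line]
      (result, idx))
    ([], -2)).1

-- ===== PORT B =====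
-- Source B's render of one included line (lines[i] is always in range: 0 ≤ i < len(lines))
def pvRenderB (lines : List String) (mset : PySem.Set Int) (line_number : Bool) (i : Int) : String :=
  let line := PySem.Str.rstrip (PySem.List.pyGetD lines i "")
  if line_number then
    PySem.Int.toStr (i + 1) ++ (if PySem.Set.contains mset i then ":" else "-") ++ line
  else line

-- Source B: included = [i for i in range(n) if any(m-before <= i <= m+after for m in mset)];
-- then one pass over zip(included, [-2] + included) emitting "--" on gaps plus the rendered line.
def add_context_py_alt (lines : List String) (match_indices : List Int) (before : Int) (after : Int) (line_number : Bool) : List String :=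
  let mset := PySem.Set.ofList match_indices
  let included := (PySem.List.pyRange 0 (lines.length : Int) 1).filter
      (fun i => mset.any (fun m => decide (m - before ≤ i) && decide (i ≤ m + after)))
  (included.zip ((-2 : Int) :: included)).flatMap (fun ip =>
      (if decide (ip.1 > ip.2 + 1) && decide (ip.2 ≥ 0) then ["--"] else [])
      ++ [pvRenderB lines mset line_number ip.1])

-- ===== PRECONDITION & SPEC =====
def Spec_add_context_py (lines : List String) (match_indices : List Int) (before : Int) (after : Int) (line_number : Bool) (out : List String) : Prop := out = add_context_py_alt lines match_indices before after line_number
instance (lines : List String) (match_indices : List Int) (before : Int) (after : Int) (line_number : Bool) (out : List String) : Decidable (Spec_add_context_py lines match_indices before after line_number out) := by unfold Spec_add_context_py; infer_instance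

-- ===== CLAIM (what is proved, stated in full; the proofs are below) =====
def Claim_equal_add_context_py : Prop := ∀ (lines : List String) (match_indices : List Int) (before : Int) (after : Int) (line_number : Bool), Dom_add_context_py lines match_indices before after line_number → Spec_add_context_py lines match_indices before after line_number (add_context_py lines match_indices before after line_number)

-- ===== LEMMAS AND PROOFS =====

-- membership in A's accumulated include set
lemma mem_incl (mi : List Int) (n before after : Int) (s : PySem.Set Int) (x : Int) :
    x ∈ mi.foldl (fun s idx =>
        (PySem.List.pyRange (max 0 (idx - before)) (min n (idx + after + 1)) 1).foldl
          (fun s i => PySem.Set.add s i) s) s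
      ↔ x ∈ s ∨ ∃ m ∈ mi, max 0 (m - before) ≤ x ∧ x < min n (m + after + 1) := by
  induction mi generalizing s with
  | nil => simp
  | cons m t ih =>
    rw [List.foldl_cons, ih]
    rw [show (PySem.List.pyRange (max 0 (m - before)) (min n (m + after + 1)) 1).foldl
          (fun s i => PySem.Set.add s i) s
        = PySem.Set.update s (PySem.List.pyRange (max 0 (m - before)) (min n (m + after + 1)) 1) from rfl]
    simp only [PySem.Set.mem_update, PySem.List.mem_pyRange_one, List.mem_cons]
    constructor
    · rintro ((h | h) | ⟨m', hm', h⟩)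
      · exact Or.inl h
      · exact Or.inr ⟨m, Or.inl rfl, h⟩
      · exact Or.inr ⟨m', Or.inr hm', h⟩
    · rintro (h | ⟨m', (rfl | hm'), h⟩)
      · exact Or.inl (Or.inl h)
      · exact Or.inl (Or.inr h)
      · exact Or.inr ⟨m', hm', h⟩

-- the accumulated include set has no duplicates
lemma nodup_incl (mi : List Int) (n before after : Int) (s : PySem.Set Int) (hs : s.Nodup) :
    (mi.foldl (fun s idx =>
        (PySem.List.pyRange (max 0 (idx - before)) (min n (idx + after + 1)) 1).foldl
          (fun s i => PySem.Set.add s i) s) s).Nodup := by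
  induction mi generalizing s with
  | nil => exact hs
  | cons m t ih =>
    rw [List.foldl_cons]
    exact ih _ (PySem.Set.nodup_update s _ hs)

-- A's sorted include list IS the filtered index range
lemma sorted_incl_eq (lines : List String) (mi : List Int) (before after : Int) :
    PySem.List.sorted
      (mi.foldl (fun s idx =>
        (PySem.List.pyRange (max 0 (idx - before)) (min (lines.length : Int) (idx + after + 1)) 1).foldl
          (fun s i => PySem.Set.add s i) s) PySem.Set.empty)
      (fun x => x)
    = (PySem.List.pyRange 0 (lines.length : Int) 1).filter
        (fun idx => mi.any (fun m => decide (m - before ≤ idx) && decide (idx ≤ m + after))) := by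
  apply PySem.List.sorted_eq_of_perm_of_pairwise_lt
  · rw [List.perm_ext_iff_of_nodup
      ((PySem.List.nodup_pyRange_one 0 (lines.length : Int)).filter _)
      (nodup_incl mi (lines.length : Int) before after PySem.Set.empty List.nodup_nil)]
    intro x
    rw [List.mem_filter, mem_incl]
    simp only [PySem.List.mem_pyRange_one, List.any_eq_true, Bool.and_eq_true, decide_eq_true_eq,
      PySem.Set.empty, List.not_mem_nil, false_or]
    constructor
    · rintro ⟨⟨h0, hn⟩, m, hm, h1, h2⟩
      exact ⟨m, hm, by omega, by omega⟩
    · rintro ⟨m, hm, h1, h2⟩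
      exact ⟨⟨by omega, by omega⟩, m, hm, by omega, by omega⟩
  · exact (PySem.List.pairwise_lt_pyRange_one 0 (lines.length : Int)).filter _

-- any over set(xs) = any over xs (same members)
lemma any_ofList (mi : List Int) (p : Int → Bool) :
    (PySem.Set.ofList mi).any p = mi.any p := by
  rw [Bool.eq_iff_iff]
  simp only [List.any_eq_true]
  constructor
  · rintro ⟨x, hx, hp⟩
    exact ⟨x, (PySem.Set.mem_ofList mi x).mp hx, hp⟩
  · rintro ⟨x, hx, hp⟩
    exact ⟨x, (PySem.Set.mem_ofList mi x).mpr hx, hp⟩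

-- membership test in set(xs) = membership test in xs
lemma contains_ofList (mi : List Int) (x : Int) :
    PySem.Set.contains (PySem.Set.ofList mi) x = mi.contains x := by
  rw [Bool.eq_iff_iff]
  rw [PySem.Set.contains_iff, PySem.Set.mem_ofList, List.contains_iff_mem]

-- A's emit body, rewritten through B's renderer
lemma bodyA_eq (lines : List String) (mi : List Int) (ln : Bool) :
    (fun (st : List String × Int) idx =>
      let result := if decide (idx > st.2 + 1) && decide (st.2 ≥ 0) then st.1 ++ ["--"] else st.1
      let line := PySem.Str.rstrip (PySem.List.pyGetD lines idx "")
      let result := if ln then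
          result ++ [PySem.Int.toStr (idx + 1) ++ (if mi.contains idx then ":" else "-") ++ line]
        else result ++ [line]
      (result, idx))
    = (fun (st : List String × Int) idx =>
      ((if decide (idx > st.2 + 1) && decide (st.2 ≥ 0) then st.1 ++ ["--"] else st.1)
        ++ [pvRenderB lines (PySem.Set.ofList mi) ln idx], idx)) := by
  funext st idx
  simp only [pvRenderB, contains_ofList]
  cases ln <;> simp

-- the stateful emit fold IS a flatMap over zip-with-previous
lemma foldl_emit_eq_flatMap (f : Int → String) :
    ∀ (xs : List Int) (res : List String) (p : Int),
      (xs.foldl (fun (st : List String × Int) idx =>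
        ((if decide (idx > st.2 + 1) && decide (st.2 ≥ 0) then st.1 ++ ["--"] else st.1)
          ++ [f idx], idx)) (res, p)).1
      = res ++ (xs.zip (p :: xs)).flatMap (fun ip =>
          (if decide (ip.1 > ip.2 + 1) && decide (ip.2 ≥ 0) then ["--"] else []) ++ [f ip.1]) := by
  intro xs
  induction xs with
  | nil => intro res p; simp
  | cons a t ih =>
    intro res p
    rw [List.foldl_cons, ih]
    show _ = res ++ (((a, p) :: t.zip (a :: t)).flatMap _)
    rw [List.flatMap_cons]
    split_ifs <;> simp

-- ===== VERDICT (by name: the statement is the Claim_ definition above) =====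
theorem add_context_py_spec : Claim_equal_add_context_py := by
  intro lines mi before after ln _
  unfold Spec_add_context_py add_context_py add_context_py_alt
  rw [sorted_incl_eq, bodyA_eq, foldl_emit_eq_flatMap]
  rw [List.filter_congr (fun x _ => (any_ofList mi
    (fun m => decide (m - before ≤ x) && decide (x ≤ m + after))).symm)]
  simp
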